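-- pv_equiv track=rewrite | github.com/scheeloong/MIE1516Winter2018FinalProject | movieLensParser.py | partitionTestUserTime
-- ===== SOURCE A (Python) =====
-- from collections import defaultdict # dictionary of list
-- import math
--
-- def partitionTestUserTime(dUserTest, numTestPartition):
--     '''
--     Splits the test set into the given number of partitions.
--     The number of partitions must be less than the number of test instances for all users
--     '''
--     dUserTestPartition = dict()
--     for userKey in dUserTest:
--         dUserTestPartition[userKey] = defaultdict(list) # to store result
--         numTestRating = len(dUserTest[userKey])
--         # Use floor as dont want to exceed number of test per partition
--         numTestPerPartition = math.floor(float(numTestRating)/float(numTestPartition))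
--         for i in range(numTestPartition-1):
--             dUserTestPartition[userKey][i] = dUserTest[userKey][numTestPerPartition*i: numTestPerPartition*(i+1)]
--         # Store everything else in last partition
--         dUserTestPartition[userKey][numTestPartition-1] = dUserTest[userKey][numTestPerPartition*(numTestPartition-1):]
--     return dUserTestPartition
-- ===== SOURCE B (Python) =====
-- from collections import defaultdict
--
-- def partitionTestUserTime(dUserTest, numTestPartition):
--     # Different decomposition: instead of computing slice boundaries by index
--     # arithmetic, consume each user's rating list front-to-back, peeling off
--     # numTestPerPartition elements per partition; the remainder is the last one.
--     dUserTestPartition = {}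
--     for userKey, ratings in dUserTest.items():
--         numTestPerPartition = len(ratings) // numTestPartition
--         parts = defaultdict(list)
--         rest = ratings
--         k = 0
--         while k < numTestPartition - 1:
--             parts[k] = rest[:numTestPerPartition]
--             rest = rest[numTestPerPartition:]
--             k += 1
--         parts[numTestPartition - 1] = rest
--         dUserTestPartition[userKey] = parts
--     return dUserTestPartition
-- ===== Notes on version B (the rewrite author's own statement) =====
-- stated objective: alternative
-- what changed: A computes each partition by index arithmetic, slicing ratings[per*i:per*(i+1)] for every i; B consumes each user's rating list front-to-back, repeatedly peeling off the first per elements with take/drop and giving the remainder to the last partition.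
-- outside the precondition, e.g. on partitionTestUserTime({1: [10, 20, 30]}, -2): A returns {1: {-3: []}}, B returns {1: {-3: [10, 20, 30]}}
import Mathlib
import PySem

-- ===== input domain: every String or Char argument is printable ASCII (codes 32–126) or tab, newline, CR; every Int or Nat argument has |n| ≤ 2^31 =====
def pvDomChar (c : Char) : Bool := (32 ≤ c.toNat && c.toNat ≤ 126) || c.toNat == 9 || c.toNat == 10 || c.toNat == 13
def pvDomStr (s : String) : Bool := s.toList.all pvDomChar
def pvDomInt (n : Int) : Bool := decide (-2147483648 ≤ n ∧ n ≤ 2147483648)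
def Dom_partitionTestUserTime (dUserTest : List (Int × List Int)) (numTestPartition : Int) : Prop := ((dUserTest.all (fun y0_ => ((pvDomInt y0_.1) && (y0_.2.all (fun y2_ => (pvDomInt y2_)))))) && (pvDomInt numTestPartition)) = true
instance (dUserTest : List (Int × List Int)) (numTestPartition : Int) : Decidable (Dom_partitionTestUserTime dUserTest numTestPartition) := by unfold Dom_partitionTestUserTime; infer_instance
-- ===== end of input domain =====

-- B replaces A's index-arithmetic slicing with a single front-to-back take/drop consumption
-- of each user's rating list (alternative decomposition, same cost).


-- ===== PORT A =====
-- math.floor(float(n)/float(p)) is ported as exact integer floor division PySem.Int.floordiv;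
-- this is exact whenever the float quotient floors like the rational one (all lengths in play here).
def partitionTestUserTime (dUserTest : List (Int × List Int)) (numTestPartition : Int) : List (Int × List (Int × List Int)) :=
  dUserTest.map (fun kv =>
    let numTestRating : Int := kv.2.length
    let numTestPerPartition : Int := PySem.Int.floordiv numTestRating numTestPartition
    (kv.1,
      (PySem.List.pyRange 0 (numTestPartition - 1) 1).map
        (fun i => (i, PySem.List.slice kv.2 (some (numTestPerPartition * i)) (some (numTestPerPartition * (i + 1)))))
      ++ [(numTestPartition - 1, PySem.List.slice kv.2 (some (numTestPerPartition * (numTestPartition - 1))) none)]))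

-- ===== PORT B =====
-- the while-loop of Source B: peel rest[:per] off the front while k < numTestPartition-1
def pvPeelLoop (numTestPartition per k : Int) (rest : List Int) : List (Int × List Int) :=
  if k < numTestPartition - 1 then
    (k, PySem.List.slice rest none (some per)) ::
      pvPeelLoop numTestPartition per (k + 1) (PySem.List.slice rest (some per) none)
  else [(numTestPartition - 1, rest)]
termination_by (numTestPartition - 1 - k).toNat
decreasing_by omega

def partitionTestUserTime_alt (dUserTest : List (Int × List Int)) (numTestPartition : Int) : List (Int × List (Int × List Int)) :=
  dUserTest.map (fun kv =>
    (kv.1, pvPeelLoop numTestPartition (PySem.Int.floordiv (kv.2.length : Int) numTestPartition) 0 kv.2))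

-- ===== PRECONDITION & SPEC =====
-- Pre_ restricts to the natural domain numTestPartition ≥ 1: at 0 A raises ZeroDivisionError, and
-- negative partition counts are outside the function's purpose (its docstring assumes a positive count).
def Pre_partitionTestUserTime (dUserTest : List (Int × List Int)) (numTestPartition : Int) : Prop :=
  1 ≤ numTestPartition
instance (dUserTest : List (Int × List Int)) (numTestPartition : Int) : Decidable (Pre_partitionTestUserTime dUserTest numTestPartition) := by unfold Pre_partitionTestUserTime; infer_instance
def pvWitness_partitionTestUserTime : (List (Int × List Int)) × Int := ([(1, [10, 20, 30])], 2)

def Spec_partitionTestUserTime (dUserTest : List (Int × List Int)) (numTestPartition : Int) (out : List (Int × List (Int × List Int))) : Prop := out = partitionTestUserTime_alt dUserTest numTestPartition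
instance (dUserTest : List (Int × List Int)) (numTestPartition : Int) (out : List (Int × List (Int × List Int))) : Decidable (Spec_partitionTestUserTime dUserTest numTestPartition out) := by unfold Spec_partitionTestUserTime; infer_instance

-- ===== CLAIM (what is proved, stated in full; the proofs are below) =====
def Claim_equal_partitionTestUserTime : Prop := ∀ (dUserTest : List (Int × List Int)) (numTestPartition : Int), Dom_partitionTestUserTime dUserTest numTestPartition → Pre_partitionTestUserTime dUserTest numTestPartition → Spec_partitionTestUserTime dUserTest numTestPartition (partitionTestUserTime dUserTest numTestPartition)

-- ===== LEMMAS AND PROOFS =====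

-- B's peel loop, started at offset q*k into rs, produces exactly A's slices for partitions k … p-1.
theorem pvPeelLoop_eq_slices (p : Int) (q : Nat) :
    ∀ (n : Nat) (k : Nat) (rs : List Int), n = (p - 1 - (k : Int)).toNat → (k : Int) ≤ p - 1 →
    pvPeelLoop p (q : Int) (k : Int) (rs.drop (q * k)) =
      (PySem.List.pyRange (k : Int) (p - 1) 1).map
        (fun i => (i, PySem.List.slice rs (some ((q : Int) * i)) (some ((q : Int) * (i + 1)))))
      ++ [(p - 1, PySem.List.slice rs (some ((q : Int) * (p - 1))) none)] := by
  intro n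
  induction n with
  | zero =>
    intro k rs hn hk
    have hk' : (k : Int) = p - 1 := by omega
    rw [pvPeelLoop, if_neg (by omega)]
    have he : PySem.List.pyRange (k : Int) (p - 1) 1 = [] := by
      rw [PySem.List.pyRange_one]
      have : (p - 1 - (k : Int)).toNat = 0 := by omega
      rw [this]; simp
    have hs : PySem.List.slice rs (some ((q : Int) * (p - 1))) none = rs.drop (q * k) := by
      have hc : ((q * k : Nat) : Int) = (q : Int) * (p - 1) := by push_cast; rw [← hk']
      rw [← hc, PySem.List.slice_from_natCast]
    rw [he, hs]
    simp
  | succ m ih =>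
    intro k rs hn hk
    have hlt : (k : Int) < p - 1 := by omega
    rw [pvPeelLoop, if_pos hlt]
    rw [PySem.List.pyRange_one_cons hlt]
    have hcast : ∀ (a : Nat), ((a : Nat) : Int) = (a : Int) := fun _ => rfl
    -- head element
    have hhead : PySem.List.slice (rs.drop (q * k)) none (some (q : Int)) =
        PySem.List.slice rs (some ((q : Int) * (k : Int))) (some ((q : Int) * ((k : Int) + 1))) := by
      have h1 : ((q * k : Nat) : Int) = (q : Int) * (k : Int) := by push_cast; ring
      have h2 : ((q * (k + 1) : Nat) : Int) = (q : Int) * ((k : Int) + 1) := by push_cast; ring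
      rw [← h1, ← h2, PySem.List.slice_natCast, PySem.List.slice_to_natCast]
      have e : q * (k + 1) - q * k = q := by
        have : q * (k + 1) = q * k + q := by ring
        omega
      rw [e]
    -- tail: feed IH at k+1
    have htail : PySem.List.slice (rs.drop (q * k)) (some (q : Int)) none = rs.drop (q * (k + 1)) := by
      rw [PySem.List.slice_from_natCast, List.drop_drop]
      congr 1
    rw [hhead, htail]
    have hk1 : ((k + 1 : Nat) : Int) = (k : Int) + 1 := by push_cast; ring
    have := ih (k + 1) rs (by omega) (by omega)
    rw [hk1] at this
    rw [this, List.map_cons, List.cons_append]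

theorem perEntry (p : Int) (hp : 1 ≤ p) (rs : List Int) :
    pvPeelLoop p (PySem.Int.floordiv (rs.length : Int) p) 0 rs =
      (PySem.List.pyRange 0 (p - 1) 1).map
        (fun i => (i, PySem.List.slice rs (some (PySem.Int.floordiv (rs.length : Int) p * i))
                        (some (PySem.Int.floordiv (rs.length : Int) p * (i + 1)))))
      ++ [(p - 1, PySem.List.slice rs (some (PySem.Int.floordiv (rs.length : Int) p * (p - 1))) none)] := by
  set per := PySem.Int.floordiv (rs.length : Int) p with hper
  have hpos : (0 : Int) ≤ per := by
    rw [hper, PySem.Int.floordiv_eq_ediv_of_pos (by omega)]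
    exact Int.ediv_nonneg (by positivity) (by omega)
  have hq : per = ((per.toNat : Nat) : Int) := by omega
  rw [hq]
  have := pvPeelLoop_eq_slices p per.toNat (p - 1 - 0).toNat 0 rs (by simp) (by omega)
  simpa using this

-- ===== VERDICT (by name: the statement is the Claim_ definition above) =====
theorem partitionTestUserTime_spec : Claim_equal_partitionTestUserTime := by
  intro d p _ hp
  unfold Spec_partitionTestUserTime partitionTestUserTime partitionTestUserTime_alt
  apply List.map_congr_left
  intro kv _
  simpa using (perEntry p hp kv.2).symm
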